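-- pv_equiv track=rewrite | github.com/Tanishta15/AI_evaluator | doc_processing/utils/enhanced_content_extractor.py | _extract_content_enhanced
-- ===== SOURCE A (Python) =====
-- def _extract_content_enhanced(page_text: str, title: str) -> str:
--     """Extract content after removing the title."""
--     lines = page_text.split('\n')
--     content_lines = []
--     title_found = False
--
--     for line in lines:
--         line_stripped = line.strip()
--
--         # Skip the title line
--         if not title_found and title in line:
--             title_found = True
--             continue
--         elif not title_found and line_stripped.startswith('#'):
--             title_found = True
--             continue
--
--         # Add content lines
--         if title_found or not title_found:  # Start collecting after title or immediately
--             if line_stripped:  # Skip empty lines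
--                 content_lines.append(line_stripped)
--
--     # If no title was found, use all content
--     if not title_found:
--         content_lines = [line.strip() for line in lines if line.strip()]
--
--     return ' '.join(content_lines)
-- ===== SOURCE B (Python) =====
-- def _extract_content_enhanced(page_text: str, title: str) -> str:
--     """Extract content after removing the title."""
--     lines = page_text.split('\n')
--     for i, line in enumerate(lines):
--         if title in line or line.strip().startswith('#'):
--             del lines[i]
--             break
--     return ' '.join(s for line in lines for s in [line.strip()] if s)
-- ===== Notes on version B (the rewrite author's own statement) =====
-- stated objective: simpler
-- what changed: Replaces the flag-driven accumulator loop (plus its redundant no-title fallback recomputation) by: delete the first title/'#' line in place, then a single filter-and-join pass over the stripped lines.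
import Mathlib
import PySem

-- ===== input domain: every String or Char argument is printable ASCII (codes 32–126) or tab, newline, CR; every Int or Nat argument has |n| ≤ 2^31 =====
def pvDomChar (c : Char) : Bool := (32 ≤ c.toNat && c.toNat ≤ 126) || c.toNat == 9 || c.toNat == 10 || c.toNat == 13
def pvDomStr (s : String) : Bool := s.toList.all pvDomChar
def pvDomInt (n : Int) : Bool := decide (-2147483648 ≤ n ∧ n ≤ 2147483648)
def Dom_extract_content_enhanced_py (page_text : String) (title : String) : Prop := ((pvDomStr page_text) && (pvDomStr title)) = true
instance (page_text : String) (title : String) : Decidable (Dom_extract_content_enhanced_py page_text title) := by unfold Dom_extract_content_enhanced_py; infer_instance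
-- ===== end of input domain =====

-- B replaces A's flag-driven accumulator loop (and its redundant no-title fallback) by
-- "delete the first title/'#' line, then filter-and-join" — simpler, same O(n) cost.
-- Both ports work on List Char lines (PySem.Chars, exact Python semantics) and wrap to String at the end.

-- ===== PORT A =====
-- A's for-loop over lines with state (content_lines, title_found), transliterated as structural recursion
def pvLoopA (title : List Char) : List (List Char) → List (List Char) → Bool → (List (List Char) × Bool)
  | [], acc, found => (acc, found)
  | line :: rest, acc, found =>
    let line_stripped := PySem.Chars.strip line
    if !found && PySem.Chars.isIn title line then pvLoopA title rest acc true
    else if !found && PySem.Chars.startswith line_stripped ['#'] then pvLoopA title rest acc true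
    else if line_stripped ≠ [] then pvLoopA title rest (acc ++ [line_stripped]) found
    else pvLoopA title rest acc found

def extract_content_enhanced_py (page_text : String) (title : String) : String :=
  let lines := PySem.Chars.splitOn page_text.toList ['\n']
  let res := pvLoopA title.toList lines [] false
  let content_lines :=
    if !res.2 then (lines.filter (fun l => PySem.Chars.strip l ≠ [])).map PySem.Chars.strip
    else res.1
  String.ofList (PySem.Chars.join [' '] content_lines)

-- ===== PORT B =====
-- Source B's `for i, line in enumerate(lines): if …: del lines[i]; break` = remove the first matching line
def pvRemoveFirst (title : List Char) : List (List Char) → List (List Char)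
  | [] => []
  | line :: rest =>
    if PySem.Chars.isIn title line || PySem.Chars.startswith (PySem.Chars.strip line) ['#'] then rest
    else line :: pvRemoveFirst title rest

def extract_content_enhanced_py_alt (page_text : String) (title : String) : String :=
  let lines := pvRemoveFirst title.toList (PySem.Chars.splitOn page_text.toList ['\n'])
  String.ofList (PySem.Chars.join [' '] ((lines.filter (fun l => PySem.Chars.strip l ≠ [])).map PySem.Chars.strip))

-- ===== PRECONDITION & SPEC =====
def Spec_extract_content_enhanced_py (page_text : String) (title : String) (out : String) : Prop := out = extract_content_enhanced_py_alt page_text title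
instance (page_text : String) (title : String) (out : String) : Decidable (Spec_extract_content_enhanced_py page_text title out) := by unfold Spec_extract_content_enhanced_py; infer_instance

-- ===== CLAIM (what is proved, stated in full; the proofs are below) =====
def Claim_equal_extract_content_enhanced_py : Prop := ∀ (page_text : String) (title : String), Dom_extract_content_enhanced_py page_text title → Spec_extract_content_enhanced_py page_text title (extract_content_enhanced_py page_text title)

-- ===== LEMMAS AND PROOFS =====

def pvCond (title line : List Char) : Bool :=
  PySem.Chars.isIn title line || PySem.Chars.startswith (PySem.Chars.strip line) ['#']

def pvClean (ls : List (List Char)) : List (List Char) :=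
  (ls.filter (fun l => PySem.Chars.strip l ≠ [])).map PySem.Chars.strip

lemma pvLoopA_found (title : String) (ls : List (List Char)) (acc : List (List Char)) :
    pvLoopA title.toList ls acc true = (acc ++ pvClean ls, true) := by
  induction ls generalizing acc with
  | nil => simp [pvLoopA, pvClean]
  | cons l rest ih =>
    simp only [pvLoopA, Bool.not_true, Bool.false_and, Bool.false_eq_true, if_false]
    by_cases h : PySem.Chars.strip l ≠ []
    · simp [h, ih, pvClean]
    · simp only [ne_eq, not_not] at h
      simp [h, ih, pvClean]

lemma pvLoopA_main (title : String) (ls : List (List Char)) (acc : List (List Char)) :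
    pvLoopA title.toList ls acc false =
      if ls.any (pvCond title.toList) then (acc ++ pvClean (pvRemoveFirst title.toList ls), true)
      else (acc ++ pvClean ls, false) := by
  induction ls generalizing acc with
  | nil => simp [pvLoopA, pvClean]
  | cons l rest ih =>
    by_cases hc : pvCond title.toList l
    · have hrm : pvRemoveFirst title.toList (l :: rest) = rest := by
        simp only [pvRemoveFirst, pvCond] at hc ⊢; simp [hc]
      by_cases h1 : PySem.Chars.isIn title.toList l
      · simp [pvLoopA, h1, pvLoopA_found, hc, hrm]
      · have h2 : PySem.Chars.startswith (PySem.Chars.strip l) ['#'] = true := by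
          simp only [pvCond, Bool.or_eq_true] at hc
          rcases hc with hc | hc
          · exact absurd hc h1
          · exact hc
        simp [pvLoopA, h1, h2, pvLoopA_found, hc, hrm]
    · have h12 : PySem.Chars.isIn title.toList l = false ∧
          PySem.Chars.startswith (PySem.Chars.strip l) ['#'] = false := by
        simpa [pvCond] using hc
      have hrm : pvRemoveFirst title.toList (l :: rest) = l :: pvRemoveFirst title.toList rest := by
        simp [pvRemoveFirst, h12.1, h12.2]
      by_cases hs : PySem.Chars.strip l ≠ []
      · simp only [pvLoopA, h12.1, h12.2, Bool.not_false, Bool.true_and, Bool.false_eq_true,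
          if_false, if_pos hs, ih]
        by_cases ha : rest.any (pvCond title.toList) <;>
          simp [ha, hc, hrm, pvClean, hs]
      · simp only [ne_eq, not_not] at hs
        have h2' : PySem.Chars.startswith ([] : List Char) ['#'] = false := hs ▸ h12.2
        simp only [pvLoopA, h12.1, h2', Bool.not_false, Bool.true_and, Bool.false_eq_true,
          if_false, ih, hs]
        by_cases ha : rest.any (pvCond title.toList) <;>
          simp [ha, hc, hrm, pvClean, hs]

lemma pvRemoveFirst_of_no_match (title : String) (ls : List (List Char))
    (h : ls.any (pvCond title.toList) = false) : pvRemoveFirst title.toList ls = ls := by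
  induction ls with
  | nil => rfl
  | cons l rest ih =>
    simp only [List.any_cons, Bool.or_eq_false_iff] at h
    have h12 : PySem.Chars.isIn title.toList l = false ∧
        PySem.Chars.startswith (PySem.Chars.strip l) ['#'] = false := by
      simpa [pvCond] using h.1
    simp [pvRemoveFirst, h12.1, h12.2, ih h.2]

-- ===== VERDICT (by name: the statement is the Claim_ definition above) =====
theorem extract_content_enhanced_py_spec : Claim_equal_extract_content_enhanced_py := by
  intro page_text title _
  unfold Spec_extract_content_enhanced_py extract_content_enhanced_py extract_content_enhanced_py_alt
  simp only [pvLoopA_main]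
  by_cases h : (PySem.Chars.splitOn page_text.toList ['\n']).any (pvCond title.toList)
  · simp [h, pvClean]
  · simp only [Bool.not_eq_true] at h
    simp [h, pvClean, pvRemoveFirst_of_no_match title _ h]
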